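-- pv_equiv track=rewrite | github.com/levitvas/abstraction-planner | utils/interesting_patterns.py | select_best_patterns_with_goal_coverage_optimized
-- ===== SOURCE A (Python) =====
-- def select_best_patterns_with_goal_coverage_optimized(pattern_heuristic_pairs, num_patterns, goal_states):
--     if not pattern_heuristic_pairs:
--         return []
--
--     goal_set = set(goal_states)
--     all_pattern_sets = [set(p_tuple[0]) for p_tuple in pattern_heuristic_pairs]
--
--     selected_pairs = list(pattern_heuristic_pairs[:num_patterns])
--     if not selected_pairs:
--         return []
--
--     covered_goals = set()
--     # Calculate initial coverage based on the first num_patterns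
--     # Assumes selected_pairs[i] corresponds to pattern_heuristic_pairs[i] initially
--     for i in range(len(selected_pairs)):
--         pattern_index_in_all = pattern_heuristic_pairs.index(selected_pairs[i])
--         covered_goals.update(all_pattern_sets[pattern_index_in_all].intersection(goal_set))
--
--     uncovered_goals = goal_set - covered_goals
--
--     if uncovered_goals:
--         for i in range(len(selected_pairs) - 1, -1, -1):  # Iterate backwards through selected_pairs
--             if not uncovered_goals:
--                 break
--
--             # Try to find a replacement from the remaining patterns
--             for j in range(num_patterns, len(pattern_heuristic_pairs)):
--                 candidate_original_tuple = pattern_heuristic_pairs[j]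
--                 candidate_pattern_set = all_pattern_sets[j]
--
--                 newly_covered_by_candidate = candidate_pattern_set.intersection(uncovered_goals)
--
--                 if newly_covered_by_candidate:
--                     selected_pairs[i] = candidate_original_tuple
--                     uncovered_goals -= newly_covered_by_candidate
--                     break  # Move to the next pattern to potentially replace in selected_pairs
--
--     return selected_pairs
-- ===== SOURCE B (Python) =====
-- def select_best_patterns_with_goal_coverage_optimized(pattern_heuristic_pairs, num_patterns, goal_states):
--     selected_pairs = list(pattern_heuristic_pairs[:num_patterns])
--     if not selected_pairs:
--         return []
--
--     uncovered_goals = set(goal_states)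
--     for pattern, _ in selected_pairs:
--         uncovered_goals -= set(pattern)
--
--     replacements = []
--     for candidate in pattern_heuristic_pairs[num_patterns:]:
--         if not uncovered_goals or len(replacements) == len(selected_pairs):
--             break
--         gain = set(candidate[0]) & uncovered_goals
--         if gain:
--             replacements.append(candidate)
--             uncovered_goals -= gain
--
--     for k, candidate in enumerate(replacements):
--         selected_pairs[len(selected_pairs) - 1 - k] = candidate
--     return selected_pairs
-- ===== Notes on version B (the rewrite author's own statement) =====
-- stated objective: simpler
-- what changed: A's interleaved backward-slot loop that rescans all candidates (and re-looks up each selected pair with list.index) per slot is replaced by one forward greedy pass collecting replacements, with uncovered goals maintained by direct set subtraction, followed by a single backward assignment pass.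
import Mathlib
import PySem

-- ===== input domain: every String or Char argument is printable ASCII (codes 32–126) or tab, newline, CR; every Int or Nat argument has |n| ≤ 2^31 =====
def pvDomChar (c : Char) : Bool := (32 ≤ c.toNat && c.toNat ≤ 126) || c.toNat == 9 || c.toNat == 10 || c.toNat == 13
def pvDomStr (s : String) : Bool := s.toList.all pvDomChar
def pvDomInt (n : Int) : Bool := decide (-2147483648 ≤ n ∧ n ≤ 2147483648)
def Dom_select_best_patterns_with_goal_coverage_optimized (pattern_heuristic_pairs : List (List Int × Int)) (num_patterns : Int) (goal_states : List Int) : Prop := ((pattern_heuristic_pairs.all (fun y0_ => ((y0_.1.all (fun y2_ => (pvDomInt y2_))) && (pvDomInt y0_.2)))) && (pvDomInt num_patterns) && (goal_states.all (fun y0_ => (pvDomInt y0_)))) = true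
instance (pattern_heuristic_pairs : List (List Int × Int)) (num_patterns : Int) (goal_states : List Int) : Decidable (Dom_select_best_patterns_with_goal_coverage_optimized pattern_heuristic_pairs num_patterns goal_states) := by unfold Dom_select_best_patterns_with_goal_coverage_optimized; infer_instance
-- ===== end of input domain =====

-- B replaces A's interleaved backward-slot rescans by one forward greedy pass over the
-- candidates plus a final assignment pass (objective: simpler; same exact result).


-- ===== PORT A =====
-- inner 'for j in range(num_patterns, len(pattern_heuristic_pairs)): … break' of A;
-- the pyGetD defaults are never used on the indices the loops produce, and i comes
-- from range(len(selected)-1, -1, -1) so 'i.toNat' is exact for 'selected_pairs[i] = …'.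
def pvAInner (pairs : List (List Int × Int)) (allSets : List (PySem.Set Int)) (i : Int) :
    List Int → (List (List Int × Int) × PySem.Set Int) → (List (List Int × Int) × PySem.Set Int)
  | [], st => st
  | j :: js, (sel, unc) =>
      let cand := PySem.List.pyGetD pairs j ([], 0)
      let candSet := PySem.List.pyGetD allSets j []
      let newly := PySem.Set.inter candSet unc
      if newly ≠ [] then (sel.set i.toNat cand, PySem.Set.diff unc newly)
      else pvAInner pairs allSets i js (sel, unc)

-- outer 'for i in range(len(selected_pairs)-1, -1, -1)' of A, with its 'break'
def pvAOuter (pairs : List (List Int × Int)) (allSets : List (PySem.Set Int)) (np : Int) :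
    List Int → (List (List Int × Int) × PySem.Set Int) → (List (List Int × Int) × PySem.Set Int)
  | [], st => st
  | i :: is, (sel, unc) =>
      if unc = [] then (sel, unc)
      else pvAOuter pairs allSets np is
        (pvAInner pairs allSets i (PySem.List.pyRange np (PySem.List.len pairs)) (sel, unc))

def select_best_patterns_with_goal_coverage_optimized (pattern_heuristic_pairs : List (List Int × Int)) (num_patterns : Int) (goal_states : List Int) : List (List Int × Int) :=
  if pattern_heuristic_pairs = [] then [] else
  let goal_set := PySem.Set.ofList goal_states
  let all_pattern_sets := pattern_heuristic_pairs.map (fun p => PySem.Set.ofList p.1)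
  let selected := PySem.List.slice pattern_heuristic_pairs none (some num_patterns)
  if selected = [] then [] else
  -- covered-goals loop; 'pattern_heuristic_pairs.index(…)' cannot raise (selected is a prefix), so the none arm is unreachable
  let covered := (PySem.List.pyRange 0 (PySem.List.len selected)).foldl
    (fun cov i =>
      match PySem.List.index? pattern_heuristic_pairs (PySem.List.pyGetD selected i ([], 0)) with
      | some k => PySem.Set.update cov (PySem.Set.inter (PySem.List.pyGetD all_pattern_sets (k : Int) []) goal_set)
      | none => cov)
    PySem.Set.empty
  let uncovered := PySem.Set.diff goal_set covered
  if uncovered ≠ [] then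
    (pvAOuter pattern_heuristic_pairs all_pattern_sets num_patterns
      (PySem.List.pyRange (PySem.List.len selected - 1) (-1) (-1)) (selected, uncovered)).1
  else selected

-- ===== PORT B =====
-- 'for candidate in pattern_heuristic_pairs[num_patterns:]: …' of Source B, with its 'break'
def pvBCollect (n : Nat) :
    List (List Int × Int) → (List (List Int × Int) × PySem.Set Int) → (List (List Int × Int) × PySem.Set Int)
  | [], st => st
  | c :: cs, (repl, unc) =>
      if unc = [] ∨ repl.length = n then (repl, unc)
      else
        let gain := PySem.Set.inter (PySem.Set.ofList c.1) unc
        if gain ≠ [] then pvBCollect n cs (repl ++ [c], PySem.Set.diff unc gain)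
        else pvBCollect n cs (repl, unc)

def select_best_patterns_with_goal_coverage_optimized_alt (pattern_heuristic_pairs : List (List Int × Int)) (num_patterns : Int) (goal_states : List Int) : List (List Int × Int) :=
  let selected := PySem.List.slice pattern_heuristic_pairs none (some num_patterns)
  if selected = [] then [] else
  let uncovered := selected.foldl (fun unc p => PySem.Set.diff unc (PySem.Set.ofList p.1))
    (PySem.Set.ofList goal_states)
  let replacements := (pvBCollect selected.length
    (PySem.List.slice pattern_heuristic_pairs (some num_patterns) none) ([], uncovered)).1
  -- 'selected[len(selected)-1-k] = candidate'; k < len(selected) so the index is nonnegative and toNat is exact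
  (PySem.List.enumerate replacements).foldl
    (fun sel kc => sel.set ((sel.length : Int) - 1 - kc.1).toNat kc.2) selected

-- ===== PRECONDITION & SPEC =====
def Spec_select_best_patterns_with_goal_coverage_optimized (pattern_heuristic_pairs : List (List Int × Int)) (num_patterns : Int) (goal_states : List Int) (out : List (List Int × Int)) : Prop := out = select_best_patterns_with_goal_coverage_optimized_alt pattern_heuristic_pairs num_patterns goal_states
instance (pattern_heuristic_pairs : List (List Int × Int)) (num_patterns : Int) (goal_states : List Int) (out : List (List Int × Int)) : Decidable (Spec_select_best_patterns_with_goal_coverage_optimized pattern_heuristic_pairs num_patterns goal_states out) := by unfold Spec_select_best_patterns_with_goal_coverage_optimized; infer_instance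

-- ===== CLAIM (what is proved, stated in full; the proofs are below) =====
def Claim_equal_select_best_patterns_with_goal_coverage_optimized : Prop := ∀ (pattern_heuristic_pairs : List (List Int × Int)) (num_patterns : Int) (goal_states : List Int), Dom_select_best_patterns_with_goal_coverage_optimized pattern_heuristic_pairs num_patterns goal_states → Spec_select_best_patterns_with_goal_coverage_optimized pattern_heuristic_pairs num_patterns goal_states (select_best_patterns_with_goal_coverage_optimized pattern_heuristic_pairs num_patterns goal_states)

-- ===== LEMMAS AND PROOFS =====

-- abstract first-hit scan over a candidate list (A's inner loop, data-level)
def pvScan : List (List Int × Int) → PySem.Set Int → Option ((List Int × Int) × PySem.Set Int)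
  | [], _ => none
  | c :: cs, unc =>
      let g := PySem.Set.inter (PySem.Set.ofList c.1) unc
      if g ≠ [] then some (c, PySem.Set.diff unc g) else pvScan cs unc

-- A's outer loop, data-level: L is the fixed candidate sequence it rescans
def pvALoop (L : List (List Int × Int)) :
    List Int → (List (List Int × Int) × PySem.Set Int) → (List (List Int × Int) × PySem.Set Int)
  | [], st => st
  | i :: is, (sel, unc) =>
      if unc = [] then (sel, unc)
      else match pvScan L unc with
        | none => pvALoop L is (sel, unc)
        | some (c, u) => pvALoop L is (sel.set i.toNat c, u)

-- B's greedy replacement list, cap-style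
def pvCollect : List (List Int × Int) → PySem.Set Int → Nat → List (List Int × Int)
  | [], _, _ => []
  | _ :: _, _, 0 => []
  | c :: cs, unc, Nat.succ k =>
      if unc = [] then [] else
      let g := PySem.Set.inter (PySem.Set.ofList c.1) unc
      if g ≠ [] then c :: pvCollect cs (PySem.Set.diff unc g) k else pvCollect cs unc (k + 1)

-- write replacements backwards from slot i
def pvAssign : List (List Int × Int) → Int → List (List Int × Int) → List (List Int × Int)
  | sel, _, [] => sel
  | sel, i, c :: r => pvAssign (sel.set i.toNat c) (i - 1) r

def pvDesc : Nat → List Int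
  | 0 => []
  | n + 1 => (n : Int) :: pvDesc n

lemma pvCollect_zero (l : List (List Int × Int)) (u : PySem.Set Int) : pvCollect l u 0 = [] := by
  cases l <;> rfl

lemma pvCollect_nilunc (l : List (List Int × Int)) (k : Nat) : pvCollect l [] k = [] := by
  cases l <;> cases k <;> simp [pvCollect]

lemma pvScan_none_iff (l : List (List Int × Int)) (u : PySem.Set Int) :
    pvScan l u = none ↔ ∀ c ∈ l, PySem.Set.inter (PySem.Set.ofList c.1) u = [] := by
  induction l with
  | nil => simp [pvScan]
  | cons c cs ih => by_cases h : PySem.Set.inter (PySem.Set.ofList c.1) u = [] <;> simp [pvScan, h, ih]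

lemma pvScan_append_none {l1 : List (List Int × Int)} {u : PySem.Set Int}
    (h : pvScan l1 u = none) (l2 : List (List Int × Int)) :
    pvScan (l1 ++ l2) u = pvScan l2 u := by
  induction l1 with
  | nil => simp
  | cons c cs ih =>
      by_cases hg : PySem.Set.inter (PySem.Set.ofList c.1) u = []
      · simp only [pvScan, hg] at h
        simp only [List.cons_append, pvScan, hg]
        simp only [ne_eq, not_true_eq_false, if_false] at h ⊢
        exact ih h
      · simp [pvScan, hg] at h

lemma pvMono {u' u : PySem.Set Int} (hsub : ∀ y, y ∈ u' → y ∈ u) {s : List Int}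
    (h : PySem.Set.inter (PySem.Set.ofList s) u = []) :
    PySem.Set.inter (PySem.Set.ofList s) u' = [] := by
  simp only [PySem.Set.inter, List.filter_eq_nil_iff] at h ⊢
  intro a ha hc
  exact h a ha (by
    rcases (PySem.Set.contains_iff u' a).mp hc with hm
    exact (PySem.Set.contains_iff u a).mpr (hsub a hm))

lemma pvDiff_subset (u g : PySem.Set Int) : ∀ y, y ∈ PySem.Set.diff u g → y ∈ u := by
  intro y hy; exact ((PySem.Set.mem_diff u g y).mp hy).1

lemma pvSelfKill (s : List Int) (u : PySem.Set Int) :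
    PySem.Set.inter (PySem.Set.ofList s)
      (PySem.Set.diff u (PySem.Set.inter (PySem.Set.ofList s) u)) = [] := by
  simp only [PySem.Set.inter, List.filter_eq_nil_iff]
  intro a ha hc
  rw [PySem.Set.contains_iff] at hc
  rcases (PySem.Set.mem_diff _ _ _).mp hc with ⟨hu, hnd⟩
  exact hnd (by
    simp only [List.mem_filter]
    exact ⟨ha, (PySem.Set.contains_iff _ _).mpr hu⟩)

lemma pvALoop_none {L : List (List Int × Int)} {u : PySem.Set Int}
    (h : pvScan L u = none) (is : List Int) (sel : List (List Int × Int)) :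
    pvALoop L is (sel, u) = (sel, u) := by
  induction is generalizing sel with
  | nil => rfl
  | cons i is ih =>
      simp only [pvALoop]
      by_cases hu : u = []
      · simp [hu]
      · simp [hu, h, ih]

-- the heart: A's backward-slot rescan loop = greedy collect + backward assignment
lemma pvMain (m : Nat) :
    ∀ (dead live junk sel : List (List Int × Int)) (unc : PySem.Set Int),
    (∀ c ∈ dead, PySem.Set.inter (PySem.Set.ofList c.1) unc = []) →
    (∀ c ∈ junk, PySem.Set.inter (PySem.Set.ofList c.1) unc = [] ∨ c ∈ dead ++ live) →
    (pvALoop (dead ++ live ++ junk) (pvDesc m) (sel, unc)).1 =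
      pvAssign sel ((m : Int) - 1) (pvCollect live unc m) := by
  induction m with
  | zero => intro dead live junk sel unc _ _; simp [pvDesc, pvALoop, pvCollect_zero, pvAssign]
  | succ m ih =>
      intro dead live junk sel unc Hdead Hjunk
      by_cases hu : unc = []
      · subst hu
        simp [pvDesc, pvALoop, pvCollect_nilunc, pvAssign]
      · induction live generalizing dead with
        | nil =>
            have hnone : pvScan (dead ++ [] ++ junk) unc = none := by
              rw [pvScan_none_iff]
              intro c hc
              rcases List.mem_append.mp hc with h1 | h2
              · exact Hdead c (by simpa using h1)
              · rcases Hjunk c h2 with h | h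
                · exact h
                · exact Hdead c (by simpa using h)
            rw [pvALoop_none hnone, pvCollect]
            rfl
        | cons c cs ihl =>
            by_cases hg : PySem.Set.inter (PySem.Set.ofList c.1) unc = []
            · have e1 : dead ++ (c :: cs) ++ junk = (dead ++ [c]) ++ cs ++ junk := by simp
              have e2 : dead ++ (c :: cs) = (dead ++ [c]) ++ cs := by simp
              rw [e1]
              rw [ihl (dead ++ [c])
                (by intro d hd; rcases List.mem_append.mp hd with h | h
                    · exact Hdead d h
                    · simp at h; subst h; exact hg)
                (by intro d hd; rcases Hjunk d hd with h | h
                    · exact Or.inl h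
                    · exact Or.inr (by rw [← e2]; exact h))]
              have : pvCollect (c :: cs) unc (m + 1) = pvCollect cs unc (m + 1) := by
                simp [pvCollect, hu, hg]
              rw [this]
            · -- head of live has gain: the scan picks it
              have hscan : pvScan (dead ++ (c :: cs) ++ junk) unc =
                  some (c, PySem.Set.diff unc (PySem.Set.inter (PySem.Set.ofList c.1) unc)) := by
                have hd : pvScan dead unc = none := (pvScan_none_iff _ _).mpr Hdead
                rw [List.append_assoc, pvScan_append_none hd]
                simp [pvScan, hg]
              set g := PySem.Set.inter (PySem.Set.ofList c.1) unc with hgdef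
              set u' := PySem.Set.diff unc g with hu'def
              have hsub : ∀ y, y ∈ u' → y ∈ unc := pvDiff_subset unc g
              have step : pvALoop (dead ++ (c :: cs) ++ junk) (pvDesc (m + 1)) (sel, unc) =
                  pvALoop (dead ++ (c :: cs) ++ junk) (pvDesc m) (sel.set ((m : Int)).toNat c, u') := by
                simp only [pvDesc, pvALoop, hscan]
                simp [hu]
              rw [step]
              have e1 : dead ++ (c :: cs) ++ junk = (dead ++ c :: []) ++ cs ++ junk := by simp
              rw [e1]
              rw [ih (dead ++ [c]) cs junk (sel.set ((m : Int)).toNat c) u'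
                (by intro d hd; rcases List.mem_append.mp hd with h | h
                    · exact pvMono hsub (Hdead d h)
                    · simp at h; subst h; exact pvSelfKill _ _)
                (by intro d hd; rcases Hjunk d hd with h | h
                    · exact Or.inl (pvMono hsub h)
                    · exact Or.inr (by simpa using (by simpa using h : d ∈ dead ++ c :: cs)))]
              have hc : pvCollect (c :: cs) unc (m + 1) = c :: pvCollect cs u' m := by
                simp [pvCollect, hu, hg, ← hgdef, ← hu'def]
              rw [hc]
              have : ((m : Int) + 1) - 1 = (m : Int) := by ring
              simp [pvAssign, Nat.cast_succ, this]

-- pvAInner is pvScan over the fetched candidates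
lemma pvAInner_eq (pairs : List (List Int × Int)) (i : Int) (js : List Int)
    (sel : List (List Int × Int)) (unc : PySem.Set Int) :
    pvAInner pairs (pairs.map (fun p => PySem.Set.ofList p.1)) i js (sel, unc) =
      match pvScan (js.map (fun j => PySem.List.pyGetD pairs j ([], 0))) unc with
      | none => (sel, unc)
      | some (c, u) => (sel.set i.toNat c, u) := by
  induction js with
  | nil => rfl
  | cons j js ih =>
      have hset : PySem.List.pyGetD (pairs.map (fun p => PySem.Set.ofList p.1)) j [] =
          PySem.Set.ofList (PySem.List.pyGetD pairs j ([], 0)).1 :=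
        PySem.List.pyGetD_map (fun p => PySem.Set.ofList p.1) pairs j ([], 0)
      simp only [pvAInner, hset, List.map_cons, pvScan]
      by_cases hg : PySem.Set.inter (PySem.Set.ofList (PySem.List.pyGetD pairs j ([], 0)).1) unc = []
      · simp [hg, ih]
      · simp [hg]

lemma pvAOuter_eq (pairs : List (List Int × Int)) (np : Int) (is : List Int)
    (sel : List (List Int × Int)) (unc : PySem.Set Int) :
    pvAOuter pairs (pairs.map (fun p => PySem.Set.ofList p.1)) np is (sel, unc) =
      pvALoop ((PySem.List.pyRange np (PySem.List.len pairs)).map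
        (fun j => PySem.List.pyGetD pairs j ([], 0))) is (sel, unc) := by
  induction is generalizing sel unc with
  | nil => rfl
  | cons i is ih =>
      simp only [pvAOuter, pvALoop]
      by_cases hu : unc = []
      · simp [hu]
      · rw [if_neg hu, if_neg hu, pvAInner_eq]
        cases hs : pvScan ((PySem.List.pyRange np (PySem.List.len pairs)).map
            (fun j => PySem.List.pyGetD pairs j ([], 0))) unc with
        | none => simp [ih]
        | some cu => cases cu; simp [ih]

-- range(len(selected)-1, -1, -1) is the descending index list
lemma pvRange_desc (m : Nat) : PySem.List.pyRange ((m : Int) - 1) (-1) (-1) = (List.range m).map (fun k : Nat => (m : Int) - 1 - (k : Int)) := by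
  cases m with
  | zero => rfl
  | succ m =>
      simp only [PySem.List.pyRange]
      rw [if_neg (by norm_num), if_neg (by norm_num), if_pos (show (-1:Int) < (m+1:Nat) - 1 by push_cast; omega)]
      rw [show (((m+1:Nat):Int) - 1 - -1 + - -1 - 1) / - -1 = ((m:Int) + 1) by push_cast; norm_num]
      rw [show ((m:Int)+1).toNat = m + 1 from by omega]
      apply List.map_congr_left
      intro k _
      push_cast
      ring

lemma pvDesc_eq_pyRange (n : Nat) : PySem.List.pyRange ((n : Int) - 1) (-1) (-1) = pvDesc n := by
  induction n with
  | zero => rfl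
  | succ n ih =>
      rw [pvRange_desc, List.range_succ_eq_map, List.map_cons, List.map_map, pvDesc, ← ih, pvRange_desc]
      congr 1
      · push_cast; ring
      · apply List.map_congr_left; intro k _; simp [Function.comp]; ring


-- candidate-sequence computation lemmas
lemma pvMap_pyRange_nonneg {α : Type} (xs : List α) (d : α) {a : Int} (ha : 0 ≤ a) :
    (PySem.List.pyRange a (PySem.List.len xs)).map (fun j => PySem.List.pyGetD xs j d) =
      xs.drop a.toNat := by
  have h := PySem.List.foldl_pyRange_pyGetD xs d (fun acc p => acc ++ [p]) ([] : List α) ha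
  rw [PySem.List.foldl_append_singleton_eq_self, List.nil_append] at h
  rw [← h]
  have := PySem.List.foldl_append_singleton_eq_map (fun j => PySem.List.pyGetD xs j d)
    (PySem.List.pyRange a (PySem.List.len xs)) []
  rw [List.nil_append] at this
  exact this.symm

lemma pvMap_pyRange_neg {α : Type} (xs : List α) (d : α) :
    ∀ k : Nat, k ≤ xs.length →
    (PySem.List.pyRange (-(k : Int)) 0).map (fun j => PySem.List.pyGetD xs j d) =
      xs.drop (xs.length - k) := by
  intro k
  induction k with
  | zero => intro _; rw [show (-(0:Nat):Int) = 0 by norm_num]; simp [List.drop_length]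
  | succ k ih =>
      intro hk
      rw [PySem.List.pyRange_one_cons (by omega), List.map_cons]
      have hidx : xs.length - (k+1) < xs.length := by omega
      have hhead : PySem.List.pyGetD xs (-((k+1 : Nat) : Int)) d = xs[xs.length - (k+1)] := by
        simp only [PySem.List.pyGetD, PySem.List.pyGet?, PySem.List.pyIdx?]
        rw [if_neg (by omega), if_pos (by push_cast; omega)]
        have : (-(-((k+1:Nat):Int))).toNat = k + 1 := by omega
        rw [this]
        simp [List.getElem?_eq_getElem hidx]
      rw [hhead, show (-((k+1:Nat):Int) + 1) = -((k:Nat):Int) by push_cast; ring, ih (by omega),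
        List.drop_eq_getElem_cons hidx]
      congr 2
      omega

-- uncovered-goals computation lemmas
lemma pvDiff_update (g cov : PySem.Set Int) (s : List Int) :
    PySem.Set.diff g (PySem.Set.update cov (PySem.Set.inter (PySem.Set.ofList s) g)) =
      PySem.Set.diff (PySem.Set.diff g cov) (PySem.Set.ofList s) := by
  simp only [PySem.Set.diff, List.filter_filter]
  apply List.filter_congr
  intro x hx
  have h1 : (PySem.Set.contains (PySem.Set.update cov (PySem.Set.inter (PySem.Set.ofList s) g)) x = true) ↔ (x ∈ cov ∨ x ∈ PySem.Set.ofList s) := by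
    rw [PySem.Set.contains_iff, PySem.Set.mem_update, PySem.Set.mem_inter]
    constructor
    · rintro (h | ⟨h, _⟩) ; exacts [Or.inl h, Or.inr h]
    · rintro (h | h) ; exacts [Or.inl h, Or.inr ⟨h, hx⟩]
  by_cases hc : x ∈ cov <;> by_cases hs : x ∈ PySem.Set.ofList s <;>
    simp [h1, hc, hs, hx]

lemma pvUnc_mem (ps : List (List Int × Int)) :
    ∀ (u0 : PySem.Set Int) (x : Int),
      x ∈ ps.foldl (fun u p => PySem.Set.diff u (PySem.Set.ofList p.1)) u0 →
      x ∈ u0 ∧ ∀ p ∈ ps, x ∉ p.1 := by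
  induction ps with
  | nil => intro u0 x h; exact ⟨h, by simp⟩
  | cons p ps ih =>
      intro u0 x h
      rcases ih _ x h with ⟨hd, hrest⟩
      rcases (PySem.Set.mem_diff _ _ _).mp hd with ⟨hu, hns⟩
      refine ⟨hu, ?_⟩
      intro q hq
      rcases List.mem_cons.mp hq with rfl | hq
      · intro hmem; exact hns ((PySem.Set.mem_ofList _ _).mpr hmem)
      · exact hrest q hq

lemma pvSelNoGain {selected : List (List Int × Int)} {g0 : PySem.Set Int}
    {c : List Int × Int} (hc : c ∈ selected) :
    PySem.Set.inter (PySem.Set.ofList c.1)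
      (selected.foldl (fun u p => PySem.Set.diff u (PySem.Set.ofList p.1)) g0) = [] := by
  simp only [PySem.Set.inter, List.filter_eq_nil_iff]
  intro y hy hcont
  rw [PySem.Set.contains_iff] at hcont
  exact (pvUnc_mem selected g0 y hcont).2 c hc ((PySem.Set.mem_ofList _ _).mp hy)

lemma pvCovered (g : PySem.Set Int) :
    ∀ (ps : List (List Int × Int)) (cov : PySem.Set Int),
    PySem.Set.diff g (ps.foldl (fun cov p => PySem.Set.update cov (PySem.Set.inter (PySem.Set.ofList p.1) g)) cov) =
      ps.foldl (fun u p => PySem.Set.diff u (PySem.Set.ofList p.1)) (PySem.Set.diff g cov) := by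
  intro ps
  induction ps with
  | nil => intro cov; rfl
  | cons p ps ih =>
      intro cov
      simp only [List.foldl_cons]
      rw [ih, pvDiff_update]

lemma pvDiff_empty (g : PySem.Set Int) : PySem.Set.diff g PySem.Set.empty = g := by
  simp [PySem.Set.diff, PySem.Set.empty, PySem.Set.contains]

lemma pvIndexFold (pairs selected : List (List Int × Int)) (goal : PySem.Set Int)
    (hsel : ∀ p ∈ selected, p ∈ pairs) (init : PySem.Set Int) :
    selected.foldl (fun cov p =>
      match PySem.List.index? pairs p with
      | some k => PySem.Set.update cov (PySem.Set.inter
          (PySem.List.pyGetD (pairs.map (fun q => PySem.Set.ofList q.1)) (k : Int) []) goal)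
      | none => cov) init =
    selected.foldl (fun cov p => PySem.Set.update cov (PySem.Set.inter (PySem.Set.ofList p.1) goal)) init := by
  apply PySem.List.foldl_congr_mem'
  intro p hp acc
  have hmem := hsel p hp
  cases hidx : PySem.List.index? pairs p with
  | none =>
      exfalso
      exact (List.idxOf?_eq_none_iff.mp hidx) hmem
  | some k =>
      rcases List.idxOf?_eq_some_iff.mp hidx with ⟨hk, hkp, _⟩
      have : PySem.List.pyGetD (pairs.map (fun q => PySem.Set.ofList q.1)) (k : Int) [] =
          PySem.Set.ofList p.1 := by
        rw [PySem.List.pyGetD_eq_getElem _ _ (by omega) (by simp; exact_mod_cast hk)]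
        simp only [Int.toNat_natCast]
        rw [List.getElem_map]
        rw [hkp]
      simp [this]

-- B-port bridges
lemma pvBCollect_spec (n : Nat) :
    ∀ (cs : List (List Int × Int)) (repl : List (List Int × Int)) (unc : PySem.Set Int),
      repl.length ≤ n →
      (pvBCollect n cs (repl, unc)).1 = repl ++ pvCollect cs unc (n - repl.length) := by
  intro cs
  induction cs with
  | nil => intro repl unc _; simp [pvBCollect, pvCollect]
  | cons c cs ih =>
      intro repl unc hlen
      by_cases hu : unc = []
      · subst hu
        rw [pvBCollect]
        rw [if_pos (Or.inl rfl)]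
        cases h : n - repl.length with
        | zero => simp [pvCollect_zero]
        | succ k => simp [pvCollect]
      · by_cases hfull : repl.length = n
        · rw [pvBCollect]
          simp only [if_pos (Or.inr hfull)]
          rw [hfull, Nat.sub_self, pvCollect_zero, List.append_nil]
        · rw [pvBCollect]
          rw [if_neg (by simp [hu, hfull])]
          have hk : n - repl.length = (n - (repl.length + 1)) + 1 := by omega
          by_cases hg : PySem.Set.inter (PySem.Set.ofList c.1) unc = []
          · simp only [hg, ne_eq, not_true_eq_false, if_false]
            rw [ih repl unc hlen, hk]
            rw [pvCollect]
            simp [hu, hg, ← hk]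
          · simp only [ne_eq, hg, not_false_eq_true, if_true]
            rw [ih (repl ++ [c]) _ (by simp; omega)]
            rw [hk, pvCollect]
            simp [hu, hg]

lemma pvEnum_assign :
    ∀ (r : List (List Int × Int)) (k : Int) (sel : List (List Int × Int)),
      (PySem.List.enumerate r k).foldl
        (fun sel kc => sel.set ((sel.length : Int) - 1 - kc.1).toNat kc.2) sel =
      pvAssign sel ((sel.length : Int) - 1 - k) r := by
  intro r
  induction r with
  | nil => intro k sel; rfl
  | cons c cs ih =>
      intro k sel
      have he : PySem.List.enumerate (c :: cs) k = (k, c) :: PySem.List.enumerate cs (k + 1) := by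
        simp [PySem.List.enumerate]
      rw [he, List.foldl_cons, pvAssign]
      rw [ih (k + 1) (sel.set ((sel.length : Int) - 1 - k).toNat c)]
      simp only [List.length_set]
      congr 1
      ring

-- slices via clampIdx
lemma pvSlice_to {α : Type} (xs : List α) (b : Int) :
    PySem.List.slice xs none (some b) = xs.take (PySem.List.clampIdx xs.length b) := by
  simp [PySem.List.slice]

lemma pvSlice_from {α : Type} (xs : List α) (b : Int) :
    PySem.List.slice xs (some b) none = xs.drop (PySem.List.clampIdx xs.length b) := by
  simp [PySem.List.slice]

lemma pvLen_eq {α : Type} (xs : List α) : PySem.List.len xs = (xs.length : Int) := rfl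

-- the assembled equivalence
lemma pvAB (pairs : List (List Int × Int)) (np : Int) (goals : List Int) :
    select_best_patterns_with_goal_coverage_optimized pairs np goals =
      select_best_patterns_with_goal_coverage_optimized_alt pairs np goals := by
  unfold select_best_patterns_with_goal_coverage_optimized
    select_best_patterns_with_goal_coverage_optimized_alt
  dsimp only
  by_cases hnil : pairs = []
  · subst hnil
    simp [pvSlice_to]
  · rw [if_neg hnil]
    set selected := PySem.List.slice pairs none (some np) with hseldef
    by_cases hsel : selected = []
    · simp [hsel]
    · rw [if_neg hsel, if_neg hsel]
      set cl := PySem.List.clampIdx pairs.length np with hcl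
      have hsel_take : selected = pairs.take cl := by rw [hseldef, pvSlice_to]
      have hcands : PySem.List.slice pairs (some np) none = pairs.drop cl := by
        rw [pvSlice_from]
      set cands := pairs.drop cl with hcandsdef
      have hmem_sel : ∀ p ∈ selected, p ∈ pairs := by
        intro p hp; rw [hsel_take] at hp; exact List.mem_of_mem_take hp
      -- A's uncovered set is B's
      have hunc : PySem.Set.diff (PySem.Set.ofList goals)
          ((PySem.List.pyRange 0 (PySem.List.len selected)).foldl
            (fun cov i =>
              match PySem.List.index? pairs (PySem.List.pyGetD selected i ([], 0)) with
              | some k => PySem.Set.update cov (PySem.Set.inter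
                  (PySem.List.pyGetD (pairs.map (fun p => PySem.Set.ofList p.1)) (k : Int) [])
                  (PySem.Set.ofList goals))
              | none => cov)
            PySem.Set.empty) =
          selected.foldl (fun unc p => PySem.Set.diff unc (PySem.Set.ofList p.1))
            (PySem.Set.ofList goals) := by
        rw [PySem.List.foldl_pyRange_pyGetD selected ([], 0)
          (fun cov p =>
            match PySem.List.index? pairs p with
            | some k => PySem.Set.update cov (PySem.Set.inter
                (PySem.List.pyGetD (pairs.map (fun p => PySem.Set.ofList p.1)) (k : Int) [])
                (PySem.Set.ofList goals))
            | none => cov)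
          PySem.Set.empty (le_refl 0)]
        rw [Int.toNat_zero, List.drop_zero]
        rw [pvIndexFold pairs selected (PySem.Set.ofList goals) hmem_sel]
        rw [pvCovered, pvDiff_empty]
      rw [hunc, hcands]
      set unc0 := selected.foldl (fun unc p => PySem.Set.diff unc (PySem.Set.ofList p.1))
        (PySem.Set.ofList goals) with hunc0
      by_cases hu : unc0 = []
      · rw [if_neg (by simp [hu])]
        rw [pvBCollect_spec selected.length cands [] unc0 (by simp)]
        rw [hu, pvCollect_nilunc]
        rfl
      · rw [if_pos hu]
        rw [pvAOuter_eq]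
        simp only [pvLen_eq]
        rw [pvDesc_eq_pyRange selected.length]
        rw [pvBCollect_spec selected.length cands [] unc0 (by simp)]
        simp only [List.nil_append, List.length_nil, Nat.sub_zero]
        rw [pvEnum_assign (pvCollect cands unc0 selected.length) 0 selected]
        rw [show ((selected.length : Int) - 1 - 0) = (selected.length : Int) - 1 by ring]
        -- identify A's rescanned candidate sequence
        by_cases hnp : 0 ≤ np
        · have hL : (PySem.List.pyRange np ((pairs.length : Nat) : Int)).map
              (fun j => PySem.List.pyGetD pairs j ([], 0)) = cands := by
            rw [show ((pairs.length : Nat) : Int) = PySem.List.len pairs from rfl]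
            rw [pvMap_pyRange_nonneg pairs ([], 0) hnp, hcandsdef]
            by_cases h : np.toNat ≤ pairs.length
            · congr 1
              rw [hcl, PySem.List.clampIdx, if_neg (by omega)]
              omega
            · push_neg at h
              rw [List.drop_eq_nil_of_le (by omega), List.drop_eq_nil_of_le]
              rw [hcl, PySem.List.clampIdx, if_neg (by omega)]
              omega
          rw [hL]
          have := pvMain selected.length [] cands [] selected unc0
            (by intro c hc; simp at hc) (by intro c hc; simp at hc)
          simpa using this
        · -- negative num_patterns: the scan wraps; selected entries never have gain
          push_neg at hnp
          have hclpos : 0 < cl := by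
            by_contra h
            push_neg at h
            interval_cases cl
            · simp [hsel_take] at hsel
          have hclval : cl = ((pairs.length : Int) + np).toNat := by
            rw [hcl, PySem.List.clampIdx, if_pos hnp]
            split
            · next h =>
                exfalso
                rw [hcl, PySem.List.clampIdx, if_pos hnp, if_pos h] at hclpos
                omega
            · rfl
          have hnpk : np = -(((-np).toNat : Nat) : Int) := by omega
          have hL : (PySem.List.pyRange np ((pairs.length : Nat) : Int)).map
              (fun j => PySem.List.pyGetD pairs j ([], 0)) = cands ++ (selected ++ cands) := by
            rw [PySem.List.pyRange_one_append np 0 (pairs.length : Int) (by omega) (by omega)]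
            rw [List.map_append]
            have h1 : (PySem.List.pyRange np 0).map (fun j => PySem.List.pyGetD pairs j ([], 0)) =
                cands := by
              rw [hnpk, pvMap_pyRange_neg pairs ([], 0) (-np).toNat (by omega), hcandsdef]
              congr 1
              omega
            have h2 : (PySem.List.pyRange 0 (pairs.length : Int)).map
                (fun j => PySem.List.pyGetD pairs j ([], 0)) = selected ++ cands := by
              have h3 := pvMap_pyRange_nonneg pairs ([], 0) (le_refl 0)
              rw [show PySem.List.len pairs = ((pairs.length : Nat) : Int) from rfl] at h3
              rw [h3, Int.toNat_zero, List.drop_zero, hsel_take, hcandsdef,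
                List.take_append_drop]
            rw [h1, h2]
          rw [hL]
          have := pvMain selected.length [] cands (selected ++ cands) selected unc0
            (by intro c hc; simp at hc)
            (by
              intro c hc
              rcases List.mem_append.mp hc with h | h
              · exact Or.inl (pvSelNoGain h)
              · exact Or.inr (by simp [h]))
          simpa using this

-- ===== VERDICT (by name: the statement is the Claim_ definition above) =====
theorem select_best_patterns_with_goal_coverage_optimized_spec : Claim_equal_select_best_patterns_with_goal_coverage_optimized := by
  intro pairs np goals _
  unfold Spec_select_best_patterns_with_goal_coverage_optimized
  exact pvAB pairs np goals
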